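-- pv_equiv track=rewrite | github.com/domtriola/software-notes | theory/statistics/mode.py | min_mode
-- ===== SOURCE A (Python) =====
-- import math
-- from collections import defaultdict
--
-- def min_mode(nums, n):
--     counts = defaultdict(int)
--     for num in nums:
--         counts[num] += 1
--
--     max_count = max(counts.values())
--     min_mode = math.inf
--     for num, count in counts.items():
--         if count == max_count and num < min_mode:
--             min_mode = num
--
--     return min_mode
-- ===== SOURCE B (Python) =====
-- def min_mode(nums, n):
--     s = sorted(nums)
--     best = s[0]
--     best_run = 1
--     cur = s[0]
--     run = 1
--     for x in s[1:]:
--         if x == cur: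
--             run += 1
--         else:
--             cur = x
--             run = 1
--         if run > best_run:
--             best_run = run
--             best = x
--     return best
-- ===== Notes on version B (the rewrite author's own statement) =====
-- stated objective: alternative
-- what changed: Replaces the frequency dictionary and its two dict passes with sort-then-scan: sort the list, sweep it once counting run lengths, and keep the first (hence smallest) value whose run strictly exceeds the best so far.
import Mathlib
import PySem

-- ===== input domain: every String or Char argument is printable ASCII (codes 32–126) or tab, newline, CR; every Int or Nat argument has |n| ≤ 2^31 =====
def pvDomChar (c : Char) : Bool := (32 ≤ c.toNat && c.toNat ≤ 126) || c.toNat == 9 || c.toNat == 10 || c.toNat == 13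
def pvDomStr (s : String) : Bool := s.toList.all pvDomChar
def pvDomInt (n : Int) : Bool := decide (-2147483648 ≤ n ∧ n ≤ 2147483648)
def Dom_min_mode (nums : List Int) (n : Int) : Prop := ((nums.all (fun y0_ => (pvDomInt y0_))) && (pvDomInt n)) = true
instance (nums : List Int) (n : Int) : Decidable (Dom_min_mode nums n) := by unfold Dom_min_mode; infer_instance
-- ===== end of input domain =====

-- B replaces A's frequency dictionary and its two dict passes by sort-then-scan: sort the
-- list and sweep it once, tracking the current run; the first run strictly longer than any
-- previous one starts at the smallest value of maximal count.  Alternative algorithm, same result.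

-- ===== PORT A =====
def min_mode (nums : List Int) (n : Int) : Int :=
  let counts : PySem.Dict Int Int :=
    nums.foldl (fun d num => d.modify num 0 (· + 1)) PySem.Dict.empty
  match PySem.List.max? counts.values (fun v => v) with
  | none => 0  -- Python: max() on an empty sequence raises ValueError; excluded by Pre_
  | some maxCount =>
    (counts.items.foldl
      (fun mm p => if p.2 == maxCount && mm.all (fun m => decide (p.1 < m)) then some p.1 else mm)
      (none : Option Int)).getD 0
    -- none models the math.inf sentinel; with counts nonempty the fold always yields some

-- ===== PORT B =====
-- loop body of Source B: state = (best, best_run, cur, run)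
def minModeStep (st : Int × Int × Int × Int) (y : Int) : Int × Int × Int × Int :=
  let cr := if y == st.2.2.1 then (st.2.2.1, st.2.2.2 + 1) else (y, (1 : Int))
  if cr.2 > st.2.1 then (y, cr.2, cr.1, cr.2) else (st.1, st.2.1, cr.1, cr.2)

def min_mode_alt (nums : List Int) (n : Int) : Int :=
  match PySem.List.sorted nums (fun x => x) false with
  | [] => 0  -- Python: s[0] on the empty list raises IndexError; excluded by Pre_
  | x :: rest => (rest.foldl minModeStep (x, 1, x, 1)).1

-- ===== PRECONDITION & SPEC =====
-- Pre_ excludes exactly the empty list, on which A's max() raises ValueError (B's s[0] raises too).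
def Pre_min_mode (nums : List Int) (n : Int) : Prop := nums ≠ []
instance (nums : List Int) (n : Int) : Decidable (Pre_min_mode nums n) := by unfold Pre_min_mode; infer_instance
def pvWitness_min_mode : List Int × Int := ([1, 2, 2, 3], 0)

def Spec_min_mode (nums : List Int) (n : Int) (out : Int) : Prop := out = min_mode_alt nums n
instance (nums : List Int) (n : Int) (out : Int) : Decidable (Spec_min_mode nums n out) := by unfold Spec_min_mode; infer_instance

-- ===== CLAIM (what is proved, stated in full; the proofs are below) =====
def Claim_equal_min_mode : Prop := ∀ (nums : List Int) (n : Int), Dom_min_mode nums n → Pre_min_mode nums n → Spec_min_mode nums n (min_mode nums n)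

-- ===== LEMMAS AND PROOFS =====

-- Both programs compute the unique element with maximal count that is least among those:
def IsMM (l : List Int) (r : Int) : Prop :=
  r ∈ l ∧ (∀ v ∈ l, l.count v ≤ l.count r) ∧ (∀ v ∈ l, l.count v = l.count r → r ≤ v)

lemma IsMM_unique {l : List Int} {r r' : Int} (h : IsMM l r) (h' : IsMM l r') : r = r' := by
  obtain ⟨hm, hmax, hmin⟩ := h
  obtain ⟨hm', hmax', hmin'⟩ := h'
  have h1 : l.count r = l.count r' := le_antisymm (hmax' r hm) (hmax r' hm')
  have := hmin r' hm' h1.symm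
  have := hmin' r hm h1
  omega

-- A-side: the items fold keeps the least key of count M, from a some-state …
lemma foldA_some (c : Int → Int) (M : Int) :
    ∀ (S : List Int) (r : Int), c r = M →
    ∃ r', S.foldl (fun mm k => if (c k == M) && mm.all (fun m => decide (k < m)) then some k else mm) (some r) = some r' ∧
      c r' = M ∧ r' ≤ r ∧ (r' = r ∨ r' ∈ S) ∧ (∀ k ∈ S, c k = M → r' ≤ k) := by
  intro S
  induction S with
  | nil => intro r hr; exact ⟨r, rfl, hr, le_refl r, Or.inl rfl, by simp⟩
  | cons k S ih =>
    intro r hr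
    simp only [List.foldl_cons]
    by_cases hc : ((c k == M) && Option.all (fun m => decide (k < m)) (some r)) = true
    · rw [Bool.and_eq_true] at hc
      have hck : c k = M := by simpa using hc.1
      have hkr : k < r := by simpa using hc.2
      rw [if_pos (by rw [Bool.and_eq_true]; exact hc)]
      obtain ⟨r', hfold, h1, h2, h3, h4⟩ := ih k hck
      refine ⟨r', hfold, h1, le_trans h2 (le_of_lt hkr), ?_, ?_⟩
      · rcases h3 with rfl | h3
        · exact Or.inr (by simp)
        · exact Or.inr (by simp [h3])
      · intro k' hk' hck'
        rcases List.mem_cons.mp hk' with rfl | hmem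
        · exact h2
        · exact h4 k' hmem hck'
    · rw [if_neg hc]
      obtain ⟨r', hfold, h1, h2, h3, h4⟩ := ih r hr
      refine ⟨r', hfold, h1, h2, ?_, ?_⟩
      · rcases h3 with rfl | h3
        · exact Or.inl rfl
        · exact Or.inr (by simp [h3])
      · intro k' hk' hck'
        rcases List.mem_cons.mp hk' with rfl | hmem
        · -- condition was false and c k' = M, so ¬ k' < r, i.e. r ≤ k'
          have : ¬ k' < r := by
            intro hlt
            exact hc (by simp [hck', hlt])
          omega
        · exact h4 k' hmem hck'

-- … and from the initial none-state, provided some key has count M.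
lemma foldA_none (c : Int → Int) (M : Int) :
    ∀ (S : List Int), (∃ k ∈ S, c k = M) →
    ∃ r', S.foldl (fun mm k => if (c k == M) && mm.all (fun m => decide (k < m)) then some k else mm) (none : Option Int) = some r' ∧
      c r' = M ∧ r' ∈ S ∧ (∀ k ∈ S, c k = M → r' ≤ k) := by
  intro S
  induction S with
  | nil => rintro ⟨k, hk, -⟩; simp at hk
  | cons k S ih =>
    rintro ⟨k0, hk0, hck0⟩
    simp only [List.foldl_cons]
    by_cases hck : c k = M
    · rw [if_pos (by simp [hck])]
      obtain ⟨r', hfold, h1, h2, h3, h4⟩ := foldA_some c M S k hck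
      refine ⟨r', hfold, h1, ?_, ?_⟩
      · rcases h3 with rfl | h3
        · simp
        · simp [h3]
      · intro k' hk' hck'
        rcases List.mem_cons.mp hk' with rfl | hmem
        · exact h2
        · exact h4 k' hmem hck'
    · rw [if_neg (by simp [hck])]
      rcases List.mem_cons.mp hk0 with rfl | hmem
      · exact absurd hck0 hck
      · obtain ⟨r', hf, h1, h2, h3⟩ := ih ⟨k0, hmem, hck0⟩
        refine ⟨r', hf, h1, by simp [h2], ?_⟩
        intro k' hk' hck'
        rcases List.mem_cons.mp hk' with rfl | hm
        · exact absurd hck' hck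
        · exact h3 k' hm hck'

-- B-side invariant: scanning the sorted list run by run, (best, best_run) stays the least
-- maximal-count element of the processed prefix together with its count, and (cur, run) the
-- last element with its count.
lemma foldB_inv (t : List Int) :
    ∀ (p : List Int) (best best_run cur run : Int),
    List.Pairwise (· ≤ ·) (p ++ t) →
    cur ∈ p → (∀ z ∈ p, z ≤ cur) → run = (p.count cur : Int) →
    best ∈ p → best_run = (p.count best : Int) →
    (∀ z ∈ p, (p.count z : Int) ≤ best_run) →
    (∀ z ∈ p, (p.count z : Int) = best_run → best ≤ z) →
    (t.foldl minModeStep (best, best_run, cur, run)).1 ∈ p ++ t ∧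
    (∀ z ∈ p ++ t, (p ++ t).count z ≤ (p ++ t).count (t.foldl minModeStep (best, best_run, cur, run)).1) ∧
    (∀ z ∈ p ++ t, (p ++ t).count z = (p ++ t).count (t.foldl minModeStep (best, best_run, cur, run)).1 →
      (t.foldl minModeStep (best, best_run, cur, run)).1 ≤ z) := by
  induction t with
  | nil =>
    intro p best best_run cur run _ _ _ _ hbmem hbr hmax hmin
    simp only [List.foldl_nil, List.append_nil]
    refine ⟨hbmem, ?_, ?_⟩
    · intro z hz
      have := hmax z hz
      omega
    · intro z hz hcnt
      exact hmin z hz (by omega)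
  | cons y t ih =>
    intro p best best_run cur run hpw hcmem hcmax hrun hbmem hbr hmax hmin
    have hassoc : p ++ y :: t = (p ++ [y]) ++ t := by simp
    have hpw' : List.Pairwise (· ≤ ·) ((p ++ [y]) ++ t) := by rwa [hassoc] at hpw
    have hple : ∀ z ∈ p, ∀ w ∈ y :: t, z ≤ w := (List.pairwise_append.mp hpw).2.2
    have hcy : cur ≤ y := hple cur hcmem y (by simp)
    have hbc : best ≤ cur := hcmax best hbmem
    simp only [List.foldl_cons]
    rw [hassoc]
    by_cases hyc : y = cur
    · -- same run continues
      have hstep : minModeStep (best, best_run, cur, run) y =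
          if run + 1 > best_run then (y, run + 1, cur, run + 1) else (best, best_run, cur, run + 1) := by
        simp [minModeStep, hyc]
      have hcnty : ((p ++ [y]).count cur : Int) = run + 1 := by
        subst hyc; rw [hrun]; simp [List.count_append]
      have hcnto : ∀ z, z ≠ cur → (p ++ [y]).count z = p.count z := by
        intro z hz; subst hyc
        have hyz : ¬ y = z := fun h => hz h.symm
        simp [List.count_append, hyz]
      have hcmem' : cur ∈ p ++ [y] := by simp [hcmem]
      have hcmax' : ∀ z ∈ p ++ [y], z ≤ cur := by
        intro z hz
        rcases List.mem_append.mp hz with hz | hz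
        · exact hcmax z hz
        · simp at hz; subst hz; omega
      rw [hstep]
      by_cases hgt : run + 1 > best_run
      · rw [if_pos hgt]
        subst hyc
        refine ih (p ++ [y]) y (run + 1) y (run + 1) hpw' hcmem' hcmax' hcnty.symm hcmem' hcnty.symm ?_ ?_
        · intro z hz
          by_cases hzc : z = y
          · subst hzc; omega
          · rw [hcnto z hzc]
            have : z ∈ p := by
              rcases List.mem_append.mp hz with h | h
              · exact h
              · simp at h; exact absurd h hzc
            have := hmax z this
            omega
        · intro z hz hcnt
          by_cases hzc : z = y
          · subst hzc; exact le_refl _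
          · exfalso
            rw [hcnto z hzc] at hcnt
            have : z ∈ p := by
              rcases List.mem_append.mp hz with h | h
              · exact h
              · simp at h; exact absurd h hzc
            have := hmax z this
            omega
      · rw [if_neg hgt]
        subst hyc
        have hbny : best ≠ y := by
          intro h
          subst h
          rw [hbr] at hgt
          rw [hrun] at hgt
          omega
        refine ih (p ++ [y]) best best_run y (run + 1) hpw' hcmem' hcmax' hcnty.symm (by simp [hbmem]) ?_ ?_ ?_
        · rw [hcnto best hbny]; exact hbr
        · intro z hz
          by_cases hzc : z = y
          · subst hzc; rw [hcnty]; omega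
          · rw [hcnto z hzc]
            have : z ∈ p := by
              rcases List.mem_append.mp hz with h | h
              · exact h
              · simp at h; exact absurd h hzc
            exact hmax z this
        · intro z hz hcnt
          by_cases hzc : z = y
          · subst hzc; exact hbc
          · rw [hcnto z hzc] at hcnt
            have : z ∈ p := by
              rcases List.mem_append.mp hz with h | h
              · exact h
              · simp at h; exact absurd h hzc
            exact hmin z this hcnt
    · -- new run starts at y; y is strictly above everything in p, hence fresh
      have hyp : y ∉ p := by
        intro hmem
        exact hyc (le_antisymm (hcmax y hmem) hcy)
      have hstep : minModeStep (best, best_run, cur, run) y =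
          if (1 : Int) > best_run then (y, 1, y, 1) else (best, best_run, y, 1) := by
        simp [minModeStep, hyc]
      have hbr1 : (1 : Int) ≤ best_run := by
        rw [hbr]
        have : 0 < p.count best := List.count_pos_iff.mpr hbmem
        omega
      rw [hstep, if_neg (by omega)]
      have hcnty : ((p ++ [y]).count y : Int) = 1 := by
        simp [List.count_append, List.count_eq_zero_of_not_mem hyp]
      have hcnto : ∀ z, z ≠ y → (p ++ [y]).count z = p.count z := by
        intro z hz
        have hyz : ¬ y = z := fun h => hz h.symm
        simp [List.count_append, hyz]
      have hcmem' : y ∈ p ++ [y] := by simp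
      have hcmax' : ∀ z ∈ p ++ [y], z ≤ y := by
        intro z hz
        rcases List.mem_append.mp hz with hz | hz
        · exact le_trans (hcmax z hz) hcy
        · simp at hz; omega
      have hbny : best ≠ y := fun h => hyp (h ▸ hbmem)
      refine ih (p ++ [y]) best best_run y 1 hpw' hcmem' hcmax' hcnty.symm (by simp [hbmem]) ?_ ?_ ?_
      · rw [hcnto best hbny]; exact hbr
      · intro z hz
        by_cases hzy : z = y
        · subst hzy; rw [hcnty]; omega
        · rw [hcnto z hzy]
          have : z ∈ p := by
            rcases List.mem_append.mp hz with h | h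
            · exact h
            · simp at h; exact absurd h hzy
          exact hmax z this
      · intro z hz hcnt
        by_cases hzy : z = y
        · subst hzy; exact le_trans hbc hcy
        · rw [hcnto z hzy] at hcnt
          have : z ∈ p := by
            rcases List.mem_append.mp hz with h | h
            · exact h
            · simp at h; exact absurd h hzy
          exact hmin z this hcnt

-- B's result is the least maximal-count element of nums.
lemma min_mode_alt_isMM (nums : List Int) (n : Int) (h : nums ≠ []) :
    IsMM nums (min_mode_alt nums n) := by
  unfold min_mode_alt
  cases hs : PySem.List.sorted nums (fun x => x) false with
  | nil => exact absurd ((PySem.List.sorted_eq_nil_iff _ _ _).mp hs) h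
  | cons x rest =>
    have hperm : (x :: rest).Perm nums := hs ▸ PySem.List.sorted_perm nums (fun x => x) false
    have hpw : List.Pairwise (fun a b : Int => a ≤ b) (x :: rest) := by
      have := PySem.List.sorted_pairwise nums (fun x => x)
      rwa [hs] at this
    have hinv := foldB_inv rest [x] x 1 x 1 (by simpa using hpw)
      (by simp) (by simp) (by simp) (by simp) (by simp)
      (by intro z hz; simp at hz; subst hz; simp)
      (by intro z hz _; simp at hz; omega)
    obtain ⟨h1, h2, h3⟩ := hinv
    set r := (rest.foldl minModeStep (x, 1, x, 1)).1 with hr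
    have hcount : ∀ z : Int, (x :: rest).count z = nums.count z := fun z => hperm.count_eq z
    have hmemiff : ∀ z : Int, z ∈ (x :: rest) ↔ z ∈ nums := fun z => hperm.mem_iff
    refine ⟨(hmemiff r).mp (by simpa using h1), ?_, ?_⟩
    · intro v hv
      have := h2 v (by simpa using (hmemiff v).mpr hv)
      simpa [hcount] using this
    · intro v hv hcnt
      refine h3 v (by simpa using (hmemiff v).mpr hv) ?_
      show (x :: rest).count v = (x :: rest).count r
      rw [hcount, hcount]
      exact hcnt

-- A's result is the least maximal-count element of nums.
lemma min_mode_isMM (nums : List Int) (n : Int) (h : nums ≠ []) :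
    IsMM nums (min_mode nums n) := by
  unfold min_mode
  rw [← PySem.Dict.counter_eq_foldl]
  simp only []
  rw [PySem.Dict.values_eq_map_keys _ (PySem.Dict.nodup_keys_counter nums) 0]
  simp only [PySem.Dict.keys_counter, PySem.Dict.getD_counter, PySem.Dict.items_counter,
    List.foldl_map]
  set S : List Int := PySem.Set.ofList nums with hS
  have hSne : S ≠ [] := by
    cases nums with
    | nil => exact absurd rfl h
    | cons a t =>
      intro hnil
      have : a ∈ S := by rw [hS]; exact (PySem.Set.mem_ofList _ _).mpr (by simp)
      rw [hnil] at this; simp at this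
  have hmapne : S.map (fun k => ((nums.count k : Nat) : Int)) ≠ [] := by simpa using hSne
  obtain ⟨M, hM⟩ : ∃ M, PySem.List.max? (S.map (fun k => ((nums.count k : Nat) : Int))) (fun v => v) = some M := by
    cases hmx : PySem.List.max? (S.map (fun k => ((nums.count k : Nat) : Int))) (fun v => v) with
    | none => rw [PySem.List.max?_eq_none_iff] at hmx; exact absurd hmx hmapne
    | some M => exact ⟨M, rfl⟩
  rw [hM]
  show IsMM nums ((S.foldl (fun mm k => if ((nums.count k : Nat) : Int) == M && mm.all (fun m => decide (k < m)) then some k else mm) (none : Option Int)).getD 0)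
  obtain ⟨k0, hk0S, hck0⟩ : ∃ k0 ∈ S, ((nums.count k0 : Nat) : Int) = M := by
    have := PySem.List.max?_mem hM
    rcases List.mem_map.mp this with ⟨k0, hk0, hck0⟩
    exact ⟨k0, hk0, hck0⟩
  have hmaxM : ∀ k ∈ S, ((nums.count k : Nat) : Int) ≤ M := by
    intro k hk
    exact PySem.List.max?_isMax hM _ (List.mem_map.mpr ⟨k, hk, rfl⟩)
  obtain ⟨r, hfold, hcr, hrS, hrmin⟩ :=
    foldA_none (fun k => ((nums.count k : Nat) : Int)) M S ⟨k0, hk0S, hck0⟩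
  have hfold' : (S.foldl (fun mm k => if ((nums.count k : Nat) : Int) == M && mm.all (fun m => decide (k < m)) then some k else mm) (none : Option Int)) = some r := hfold
  rw [hfold']
  simp only [Option.getD_some]
  have hmemS : ∀ z : Int, z ∈ S ↔ z ∈ nums := fun z => by
    rw [hS]; exact PySem.Set.mem_ofList _ _
  refine ⟨(hmemS r).mp hrS, ?_, ?_⟩
  · intro v hv
    have := hmaxM v ((hmemS v).mpr hv)
    omega
  · intro v hv hcnt
    refine hrmin v ((hmemS v).mpr hv) ?_
    omega

-- ===== VERDICT (by name: the statement is the Claim_ definition above) =====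
theorem min_mode_spec : Claim_equal_min_mode := by
  intro nums n _hdom hpre
  unfold Pre_min_mode at hpre
  unfold Spec_min_mode
  exact IsMM_unique (min_mode_isMM nums n hpre) (min_mode_alt_isMM nums n hpre)
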